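-- pv_equiv track=rewrite | github.com/Owlsarecool1/musicbox | Homework 3 (2).py | scale_to_ints
-- ===== SOURCE A (Python) =====
-- MAJOR_INTERVALS = [2,2,1,2,2,2,1]
--
-- MINOR_INTERVALS = [2,1,2,2,1,2,2]
--
-- def scale_to_ints(scale):
--     if scale[1] == "major":
--         notes = [scale[0]]
--         for i in MAJOR_INTERVALS:
--             notes.append(i+notes[-1])
--         return notes
--     else:
--         notes = [scale[0]]
--         for i in MINOR_INTERVALS:
--             notes.append(i+notes[-1])
--         return notes
-- ===== SOURCE B (Python) =====
-- MAJOR_OFFSETS = [0, 2, 4, 5, 7, 9, 11, 12]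
-- MINOR_OFFSETS = [0, 2, 3, 5, 7, 8, 10, 12]
--
-- def scale_to_ints(scale):
--     offsets = MAJOR_OFFSETS if scale[1] == "major" else MINOR_OFFSETS
--     return [scale[0] + off for off in offsets]
-- ===== Notes on version B (the rewrite author's own statement) =====
-- stated objective: simpler
-- what changed: Replaced the running-accumulator loop (each note appended as interval + previous note) with precomputed cumulative-offset tables and a single independent map root + offset.
import Mathlib
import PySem

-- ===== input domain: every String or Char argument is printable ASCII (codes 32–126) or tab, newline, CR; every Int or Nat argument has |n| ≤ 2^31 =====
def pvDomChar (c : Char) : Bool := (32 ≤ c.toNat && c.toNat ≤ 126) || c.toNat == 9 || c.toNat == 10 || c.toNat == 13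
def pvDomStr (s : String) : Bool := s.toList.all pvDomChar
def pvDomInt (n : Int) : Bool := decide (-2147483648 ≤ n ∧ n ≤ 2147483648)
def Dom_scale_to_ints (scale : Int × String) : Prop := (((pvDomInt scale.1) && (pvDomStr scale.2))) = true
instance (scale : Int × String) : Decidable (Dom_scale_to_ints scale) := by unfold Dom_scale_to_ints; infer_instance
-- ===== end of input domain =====

-- ===== PORT A =====
-- B replaces A's running accumulator with precomputed cumulative-offset tables (simpler decomposition).
def MAJOR_INTERVALS : List Int := [2,2,1,2,2,2,1]
def MINOR_INTERVALS : List Int := [2,1,2,2,1,2,2]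

-- the loop: notes.append(i + notes[-1]); state is the reversed notes list (head = last note)
def pvLoopA (intervals : List Int) (acc : List Int) : List Int :=
  intervals.foldl (fun acc i => (i + acc.headD 0) :: acc) acc

def scale_to_ints (scale : Int × String) : List Int :=
  if scale.2 == "major" then
    (pvLoopA MAJOR_INTERVALS [scale.1]).reverse
  else
    (pvLoopA MINOR_INTERVALS [scale.1]).reverse

-- ===== PORT B =====
def MAJOR_OFFSETS : List Int := [0, 2, 4, 5, 7, 9, 11, 12]
def MINOR_OFFSETS : List Int := [0, 2, 3, 5, 7, 8, 10, 12]

def scale_to_ints_alt (scale : Int × String) : List Int :=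
  (if scale.2 == "major" then MAJOR_OFFSETS else MINOR_OFFSETS).map (fun off => scale.1 + off)

-- ===== PRECONDITION & SPEC =====
def Spec_scale_to_ints (scale : Int × String) (out : List Int) : Prop := out = scale_to_ints_alt scale
instance (scale : Int × String) (out : List Int) : Decidable (Spec_scale_to_ints scale out) := by unfold Spec_scale_to_ints; infer_instance

-- ===== CLAIM (what is proved, stated in full; the proofs are below) =====
def Claim_equal_scale_to_ints : Prop := ∀ (scale : Int × String), Dom_scale_to_ints scale → Spec_scale_to_ints scale (scale_to_ints scale)

-- ===== LEMMAS AND PROOFS =====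

-- ===== VERDICT (by name: the statement is the Claim_ definition above) =====
theorem scale_to_ints_spec : Claim_equal_scale_to_ints := by
  intro scale _
  unfold Spec_scale_to_ints scale_to_ints scale_to_ints_alt pvLoopA
  by_cases h : scale.2 == "major" <;>
    simp [h, MAJOR_INTERVALS, MINOR_INTERVALS, MAJOR_OFFSETS, MINOR_OFFSETS,
      List.foldl] <;> ring_nf <;> simp
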